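-- pv_equiv track=rewrite | github.com/KonoAnalytics/Dunderdata | precourse-assessment/assessment.py | double_letter_words
-- ===== SOURCE A (Python) =====
-- def double_letter_words(string):
--     '''
--     Get all the words that have two consecutive repeating letters
--
--     Parameters
--     ----------
--     string: a string of words separated by spaces
--
--     Returns
--     -------
--     a list of all words that contain at least one occurrence of
--     consecutive repeating letters
--     '''
--     words = string.split()
--     repwords = []
--     for w in words:
--         foundrep = False
--         lastletter = None
--         for c in w:
--             if c == lastletter:
--                 foundrep = True
--             lastletter = c
--         if(foundrep):
--             repwords.append(w)
--     return (repwords)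
-- ===== SOURCE B (Python) =====
-- def double_letter_words(string):
--     '''
--     Get all the words that have two consecutive repeating letters.
--     Fused single pass over the characters: assemble each word in a buffer,
--     emit it at a whitespace boundary (or at the end) if a consecutive
--     repeat was seen inside it -- no str.split(), no second per-word scan.
--     '''
--     out = []
--     buf = []
--     hasdouble = False
--     for c in string:
--         if c.isspace():
--             if buf and hasdouble:
--                 out.append(''.join(buf))
--             buf = []
--             hasdouble = False
--         else:
--             if buf and buf[-1] == c:
--                 hasdouble = True
--             buf.append(c)
--     if buf and hasdouble:
--         out.append(''.join(buf))
--     return out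
-- ===== Notes on version B (the rewrite author's own statement) =====
-- stated objective: alternative
-- what changed: Replaced split()-then-per-word-scan with a fused single-pass tokenizer over the raw character stream: words are assembled in a buffer and emitted at whitespace boundaries when a consecutive repeat was seen, so str.split() and the separate per-word loop disappear.
import Mathlib
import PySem

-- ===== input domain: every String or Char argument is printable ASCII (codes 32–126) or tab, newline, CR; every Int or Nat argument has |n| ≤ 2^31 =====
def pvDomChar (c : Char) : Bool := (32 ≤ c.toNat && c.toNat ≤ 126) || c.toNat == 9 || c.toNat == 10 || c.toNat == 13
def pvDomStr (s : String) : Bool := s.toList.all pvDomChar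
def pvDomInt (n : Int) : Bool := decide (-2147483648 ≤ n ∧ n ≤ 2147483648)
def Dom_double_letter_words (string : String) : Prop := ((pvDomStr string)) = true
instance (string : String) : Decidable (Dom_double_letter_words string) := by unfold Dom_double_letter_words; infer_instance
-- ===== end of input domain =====

-- B replaces A's split()-then-per-word-scan with a fused single-pass tokenizer
-- over the character stream (alternative decomposition; same cost).


-- ===== PORT A =====
-- inner 'for c in w' loop: state (foundrep, lastletter); 'c == lastletter' is False when lastletter is None
def dlwStep (st : Bool × Option Char) (c : Char) : Bool × Option Char :=
  ((if st.2 = some c then true else st.1), some c)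

def double_letter_words (string : String) : List String :=
  let words := PySem.Str.split₀ string
  words.foldl
    (fun repwords w =>
      -- run the char loop from (foundrep=False, lastletter=None), then test foundrep
      if (w.toList.foldl dlwStep (false, none)).1 then repwords ++ [w] else repwords)
    []

-- ===== PORT B =====
-- the 'for c in string' loop of Source B: state (buf, hasdouble, out); processes the
-- remaining characters, then performs the trailing 'if buf and hasdouble' flush
def dlwScan (cs : List Char) (buf : List Char) (hasdouble : Bool) (out : List String) : List String :=
  match cs with
  | [] => if !buf.isEmpty && hasdouble then out ++ [String.ofList buf] else out
  | c :: rest =>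
      if PySem.Chars.isspace c then
        dlwScan rest [] false (if !buf.isEmpty && hasdouble then out ++ [String.ofList buf] else out)
      else
        -- 'if buf and buf[-1] == c': true iff buf's last element is c
        dlwScan rest (buf ++ [c]) (if buf.getLast? == some c then true else hasdouble) out

def double_letter_words_alt (string : String) : List String :=
  dlwScan string.toList [] false []

-- ===== PRECONDITION & SPEC =====
def Spec_double_letter_words (string : String) (out : List String) : Prop := out = double_letter_words_alt string
instance (string : String) (out : List String) : Decidable (Spec_double_letter_words string out) := by unfold Spec_double_letter_words; infer_instance

-- ===== CLAIM =====
def Claim_equal_double_letter_words : Prop := ∀ (string : String), Dom_double_letter_words string → Spec_double_letter_words string (double_letter_words string)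

-- ===== LEMMAS AND PROOFS =====

-- proof-side characterisation: a list has an adjacent equal pair
def hasPairL : List Char → Bool
  | [] => false
  | [_] => false
  | a :: b :: rest => (a == b) || hasPairL (b :: rest)

-- A's stateful loop started after character a computes hasPairL of a :: l (or b)
theorem dlw_loop_char (l : List Char) (a : Char) (b : Bool) :
    (l.foldl dlwStep (b, some a)).1 = (b || hasPairL (a :: l)) := by
  induction l generalizing a b with
  | nil => simp [hasPairL]
  | cons c l ih =>
      simp only [List.foldl_cons, dlwStep, hasPairL]
      rw [show ((if (some a = some c) then true else b), some c)
            = ((b || (a == c)), some c) by by_cases h : a = c <;> simp [h]]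
      rw [ih]
      cases b <;> simp [Bool.or_assoc]

-- A's full inner loop equals hasPairL
theorem dlw_loop_eq (w : String) :
    (w.toList.foldl dlwStep (false, none)).1 = hasPairL w.toList := by
  cases h : w.toList with
  | nil => simp [hasPairL]
  | cons a l =>
      simp only [List.foldl_cons, dlwStep]
      rw [show ((if ((none : Option Char) = some a) then true else false), some a)
            = (false, some a) by simp]
      simpa using dlw_loop_char l a false

theorem hasPairL_append_singleton (w : List Char) (c : Char) :
    hasPairL (w ++ [c]) = (hasPairL w || (w.getLast? == some c)) := by
  induction w with
  | nil => simp [hasPairL]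
  | cons a w ih =>
      cases w with
      | nil => simp [hasPairL]
      | cons b w' =>
          simp only [List.cons_append, hasPairL] at *
          rw [ih]
          simp [Bool.or_assoc]

-- the split₀ worker is accumulator-linear
theorem split0_go_acc (cs : List Char) (cur : List Char) (acc : List (List Char)) :
    PySem.Chars.split₀.go cs cur acc = acc.reverse ++ PySem.Chars.split₀.go cs cur [] := by
  induction cs generalizing cur acc with
  | nil =>
      simp only [PySem.Chars.split₀.go]
      split <;> simp
  | cons c rest ih =>
      simp only [PySem.Chars.split₀.go]
      split
      · split
        · exact ih [] acc
        · rw [ih [] (cur.reverse :: acc), ih [] [cur.reverse]]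
          simp
      · exact ih (c :: cur) acc

-- the scanner emits exactly the hasPairL-words of the remaining split
theorem dlwScan_go (cs : List Char) (buf : List Char) (flag : Bool) (out : List String)
    (hflag : flag = hasPairL buf) :
    dlwScan cs buf flag out
      = out ++ ((PySem.Chars.split₀.go cs buf.reverse []).filter hasPairL).map String.ofList := by
  induction cs generalizing buf flag out with
  | nil =>
      simp only [dlwScan, PySem.Chars.split₀.go, List.isEmpty_reverse, List.reverse_reverse]
      subst hflag
      by_cases h : buf.isEmpty = true
      · have hb : buf = [] := List.isEmpty_iff.mp h
        subst hb; simp [hasPairL]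
      · rw [if_neg h]
        by_cases hp : hasPairL buf = true <;> simp [hp, h]
  | cons c rest ih =>
      simp only [dlwScan, PySem.Chars.split₀.go, List.isEmpty_reverse, List.reverse_reverse]
      by_cases hs : PySem.Chars.isspace c = true
      · rw [if_pos hs, if_pos hs, ih [] false _ rfl]
        by_cases h : buf.isEmpty = true
        · have hb : buf = [] := List.isEmpty_iff.mp h
          subst hb; simp [hflag, hasPairL]
        · rw [if_neg h, split0_go_acc rest [] [buf]]
          subst hflag
          by_cases hp : hasPairL buf = true <;> simp [hp, h]
      · rw [if_neg hs, if_neg hs,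
            ih (buf ++ [c]) _ out
              (by rw [hasPairL_append_singleton, hflag]
                  by_cases h : buf.getLast? == some c <;> simp_all),
            show (buf ++ [c]).reverse = c :: buf.reverse from by simp]

-- ===== VERDICT =====
theorem double_letter_words_spec : Claim_equal_double_letter_words := by
  intro s _
  unfold Spec_double_letter_words
  have hA : double_letter_words s
      = (PySem.Str.split₀ s).filter (fun w => (w.toList.foldl dlwStep (false, none)).1) := by
    have h := PySem.List.foldl_append_if
      (fun w : String => (w.toList.foldl dlwStep (false, none)).1) (id : String → String)
      (PySem.Str.split₀ s) []
    simp only [List.map_id, List.nil_append, id] at h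
    exact h
  have hB : double_letter_words_alt s
      = ((PySem.Chars.split₀ s.toList).filter hasPairL).map String.ofList := by
    unfold double_letter_words_alt
    rw [dlwScan_go s.toList [] false [] rfl]
    simp [PySem.Chars.split₀]
  rw [hA, hB]
  have hb : PySem.Chars.split₀ s.toList = (PySem.Str.split₀ s).map String.toList := by
    rw [← PySem.Str.split₀_map_toList]
  rw [hb, List.filter_map, List.map_map]
  rw [show (String.ofList ∘ String.toList) = (id : String → String) from funext fun w => by simp]
  rw [List.map_id]
  apply List.filter_congr
  intro w _
  simp [Function.comp, dlw_loop_eq w]
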